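-- pv_equiv track=rewrite | github.com/vardaierwin/Transport-Rucsac | alg_gen.py | evalueaza_cromozom
-- ===== SOURCE A (Python) =====
-- def evalueaza_cromozom(cromozom, valori, greutati, capacitate_maxima):
--     scor = 0
--     greutate_totala = 0
--     # Parcurgem fiecare bit din cromozom
--     for i in range(len(cromozom)):
--         # Dacă bitul este '1', adăugăm valoarea și greutatea asociate
--         if cromozom[i] == '1':
--             # Verificăm dacă adăugarea greutății depășește capacitatea maximă
--             if greutate_totala + greutati[i] > capacitate_maxima:
--                 break  # Oprim adăugarea dacă depășește capacitatea
--             scor += valori[i]  # Adăugăm valoarea obiectului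
--             greutate_totala += greutati[i]  # Adăugăm greutatea obiectului
--     return scor, greutate_totala
-- ===== SOURCE B (Python) =====
-- def evalueaza_cromozom(cromozom, valori, greutati, capacitate_maxima):
--     # Filter the selected (value, weight) pairs, build a prefix-sum table of
--     # weights, cut it at the first entry exceeding the capacity, and read the
--     # answer off the prefix.
--     sel = [(valori[i], greutati[i]) for i, b in enumerate(cromozom) if b == '1']
--     cum = []
--     t = 0
--     for _, w in sel:
--         t += w
--         cum.append(t)
--     k = len(cum)
--     for j, cw in enumerate(cum):
--         if cw > capacitate_maxima:
--             k = j
--             break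
--     return sum(v for v, _ in sel[:k]), (cum[k - 1] if k else 0)
-- ===== Notes on version B (the rewrite author's own statement) =====
-- stated objective: alternative
-- what changed: Replaces A's single loop with break by a pipeline: filter the selected (value,weight) pairs, build a prefix-sum table of weights, find the cutoff index at the first prefix sum exceeding the capacity, and read the score and total weight off that prefix.
-- outside the precondition, e.g. on evalueaza_cromozom('11', [1], [5], 0): A returns (0, 0), B raises IndexError
import Mathlib
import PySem

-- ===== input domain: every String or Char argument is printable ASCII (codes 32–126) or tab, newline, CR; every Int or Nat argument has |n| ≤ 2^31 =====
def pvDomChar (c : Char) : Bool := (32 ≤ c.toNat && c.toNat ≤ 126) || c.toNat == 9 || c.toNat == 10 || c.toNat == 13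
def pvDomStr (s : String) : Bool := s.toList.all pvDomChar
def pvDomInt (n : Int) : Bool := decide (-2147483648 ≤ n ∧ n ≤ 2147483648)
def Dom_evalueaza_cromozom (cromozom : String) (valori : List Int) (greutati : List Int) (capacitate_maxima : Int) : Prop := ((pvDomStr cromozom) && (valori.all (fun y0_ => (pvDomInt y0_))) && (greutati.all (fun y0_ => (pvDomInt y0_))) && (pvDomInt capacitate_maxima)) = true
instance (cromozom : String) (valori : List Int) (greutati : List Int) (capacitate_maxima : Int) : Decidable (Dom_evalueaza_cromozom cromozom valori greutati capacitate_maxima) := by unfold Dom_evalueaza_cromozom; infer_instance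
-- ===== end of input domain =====

-- B replaces A's single break-loop by a filter / prefix-sum / cutoff pipeline (alternative decomposition, same cost).

-- ===== PORT A =====
-- A's loop over i in range(len(cromozom)) with an early break; on an out-of-range
-- valori[i]/greutati[i] Python raises IndexError (excluded by Pre_), the port stops there.
def evalAAux (valori greutati : List Int) (cap : Int) : List Char → Nat → Int → Int → Int × Int
  | [], _, scor, gt => (scor, gt)
  | c :: rest, i, scor, gt =>
    if c = '1' then
      match PySem.List.pyGet? valori (Int.ofNat i), PySem.List.pyGet? greutati (Int.ofNat i) with
      | some v, some g =>
        if gt + g > cap then (scor, gt)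
        else evalAAux valori greutati cap rest (i + 1) (scor + v) (gt + g)
      | _, _ => (scor, gt)   -- IndexError in Python; outside Pre_
    else evalAAux valori greutati cap rest (i + 1) scor gt

def evalueaza_cromozom (cromozom : String) (valori : List Int) (greutati : List Int) (capacitate_maxima : Int) : Int × Int :=
  evalAAux valori greutati capacitate_maxima cromozom.toList 0 0 0

-- ===== PORT B =====
-- sel = [(valori[i], greutati[i]) for i, b in enumerate(cromozom) if b == '1']
def selPairs (valori greutati : List Int) : List (Int × Char) → List (Int × Int)
  | [] => []
  | (i, b) :: rest =>
    if b = '1' then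
      match PySem.List.pyGet? valori i, PySem.List.pyGet? greutati i with
      | some v, some w => (v, w) :: selPairs valori greutati rest
      | _, _ => []   -- IndexError in Python; outside Pre_
    else selPairs valori greutati rest

-- prefix sums of the weights, running total t
def cumW : List (Int × Int) → Int → List Int
  | [], _ => []
  | (_, w) :: rest, t => (t + w) :: cumW rest (t + w)

-- first index whose prefix sum exceeds the capacity (else the full length)
def cutoff (cap : Int) : List Int → Nat
  | [] => 0
  | cw :: rest => if cw > cap then 0 else 1 + cutoff cap rest

def evalueaza_cromozom_alt (cromozom : String) (valori : List Int) (greutati : List Int) (capacitate_maxima : Int) : Int × Int :=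
  let sel := selPairs valori greutati (PySem.List.enumerate cromozom.toList)
  let cum := cumW sel 0
  let k := cutoff capacitate_maxima cum
  (((sel.take k).map Prod.fst).sum,
   if k = 0 then 0 else (PySem.List.pyGet? cum ((k : Int) - 1)).getD 0)

-- ===== PRECONDITION & SPEC =====
-- Pre_ excludes the inputs where a '1' bit sits beyond valori/greutati (Python A may
-- raise IndexError there; when its break fires first it still returns, an accident of
-- the scan order that B's pipeline, which reads all selected pairs first, cannot match).
def Pre_evalueaza_cromozom (cromozom : String) (valori : List Int) (greutati : List Int) (capacitate_maxima : Int) : Prop :=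
  ∀ i < cromozom.toList.length, cromozom.toList[i]? = some '1' → i < valori.length ∧ i < greutati.length
instance (cromozom : String) (valori : List Int) (greutati : List Int) (capacitate_maxima : Int) : Decidable (Pre_evalueaza_cromozom cromozom valori greutati capacitate_maxima) := by unfold Pre_evalueaza_cromozom; infer_instance

def pvWitness_evalueaza_cromozom : String × List Int × List Int × Int := ("101", [3, 4, 5], [2, 1, 6], 8)

def Spec_evalueaza_cromozom (cromozom : String) (valori : List Int) (greutati : List Int) (capacitate_maxima : Int) (out : Int × Int) : Prop := out = evalueaza_cromozom_alt cromozom valori greutati capacitate_maxima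
instance (cromozom : String) (valori : List Int) (greutati : List Int) (capacitate_maxima : Int) (out : Int × Int) : Decidable (Spec_evalueaza_cromozom cromozom valori greutati capacitate_maxima out) := by unfold Spec_evalueaza_cromozom; infer_instance

-- ===== CLAIM (what is proved, stated in full; the proofs are below) =====
def Claim_equal_evalueaza_cromozom : Prop := ∀ (cromozom : String) (valori : List Int) (greutati : List Int) (capacitate_maxima : Int), Dom_evalueaza_cromozom cromozom valori greutati capacitate_maxima → Pre_evalueaza_cromozom cromozom valori greutati capacitate_maxima → Spec_evalueaza_cromozom cromozom valori greutati capacitate_maxima (evalueaza_cromozom cromozom valori greutati capacitate_maxima)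

-- ===== LEMMAS AND PROOFS =====

-- what B computes on the suffix starting at index i with running state (scor, gt)
def bSuffix (valori greutati : List Int) (cap : Int) (es : List (Int × Char)) (scor gt : Int) : Int × Int :=
  let sel := selPairs valori greutati es
  let cum := cumW sel gt
  let k := cutoff cap cum
  (scor + ((sel.take k).map Prod.fst).sum,
   if k = 0 then gt else (PySem.List.pyGet? cum ((k : Int) - 1)).getD 0)

theorem evalAAux_eq_bSuffix (valori greutati : List Int) (cap : Int) :
    ∀ (cs : List Char) (i : Nat) (scor gt : Int),
    (∀ j < cs.length, cs[j]? = some '1' → i + j < valori.length ∧ i + j < greutati.length) →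
    evalAAux valori greutati cap cs i scor gt =
      bSuffix valori greutati cap (PySem.List.enumerate cs (i : Int)) scor gt := by
  intro cs
  induction cs with
  | nil => intro i scor gt _; simp [evalAAux, bSuffix, PySem.List.enumerate_nil, selPairs, cumW, cutoff]
  | cons c rest ih =>
    intro i scor gt H
    have hhead := H 0 (by simp) 
    rw [PySem.List.enumerate_cons]
    by_cases hc : c = '1'
    · subst hc
      obtain ⟨hv, hg⟩ := hhead (by simp)
      have hv' : PySem.List.pyGet? valori (Int.ofNat i) = some valori[i] := by
        rw [show Int.ofNat i = (i : Int) from rfl, PySem.List.pyGet?_natCast]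
        simp [List.getElem?_eq_getElem (by omega : i < valori.length)]
      have hg' : PySem.List.pyGet? greutati (Int.ofNat i) = some greutati[i] := by
        rw [show Int.ofNat i = (i : Int) from rfl, PySem.List.pyGet?_natCast]
        simp [List.getElem?_eq_getElem (by omega : i < greutati.length)]
      have hrest : ∀ j < rest.length, rest[j]? = some '1' →
          (i + 1) + j < valori.length ∧ (i + 1) + j < greutati.length := by
        intro j hj h1
        have := H (j + 1) (by simp; omega) (by simpa using h1)
        omega
      have hv2 : valori[i]? = some valori[i] := List.getElem?_eq_getElem (by omega)
      have hg2 : greutati[i]? = some greutati[i] := List.getElem?_eq_getElem (by omega)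
      simp only [evalAAux, hv', hg']
      clear hhead
      by_cases hover : gt + greutati[i] > cap
      · simp only [if_pos hover]
        simp [bSuffix, selPairs, hv2, hg2, cumW, cutoff, if_pos hover]
      · simp only [if_neg hover]
        rw [ih (i + 1) (scor + valori[i]) (gt + greutati[i]) (by exact_mod_cast hrest)]
        simp only [bSuffix, selPairs]
        rw [show ((i : Int) + 1) = ((i + 1 : Nat) : Int) by push_cast; ring]
        simp only [PySem.List.pyGet?_natCast, hv2, hg2, if_true]
        set sel' := selPairs valori greutati (PySem.List.enumerate rest ((i + 1 : Nat) : Int)) with hsel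
        simp only [cumW, cutoff, if_neg hover]
        set k' := cutoff cap (cumW sel' (gt + greutati[i])) with hk
        refine Prod.ext ?_ ?_
        · rw [Nat.add_comm 1 k', List.take_succ_cons, List.map_cons, List.sum_cons]
          ring
        · rw [Nat.add_comm 1 k']
          simp only [if_neg (Nat.succ_ne_zero k')]
          have e1 : ((k' + 1 : Nat) : Int) - 1 = ((k' : Nat) : Int) := by push_cast; ring
          rw [e1, PySem.List.pyGet?_natCast]
          rcases Nat.eq_zero_or_pos k' with h0 | hpos
          · simp [h0]
          · simp only [if_neg (by omega : k' ≠ 0)]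
            have e2 : ((k' : Nat) : Int) - 1 = ((k' - 1 : Nat) : Int) := by omega
            rw [e2, PySem.List.pyGet?_natCast]
            obtain ⟨m, hm⟩ : ∃ m, k' = m + 1 := ⟨k' - 1, by omega⟩
            rw [hm]
            simp
    · have hrest : ∀ j < rest.length, rest[j]? = some '1' →
          (i + 1) + j < valori.length ∧ (i + 1) + j < greutati.length := by
        intro j hj h1
        have := H (j + 1) (by simp; omega) (by simpa using h1)
        omega
      simp only [evalAAux, if_neg hc]
      rw [ih (i + 1) scor gt hrest]
      rw [show ((i : Int) + 1) = ((i + 1 : Nat) : Int) by push_cast; ring]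
      simp [bSuffix, selPairs, if_neg hc]

-- ===== VERDICT (by name: the statement is the Claim_ definition above) =====
theorem evalueaza_cromozom_spec : Claim_equal_evalueaza_cromozom := by
  intro cromozom valori greutati cap _ hpre
  unfold Spec_evalueaza_cromozom evalueaza_cromozom evalueaza_cromozom_alt
  rw [evalAAux_eq_bSuffix valori greutati cap cromozom.toList 0 0 0
        (by intro j hj h1; simpa using hpre j hj h1)]
  simp [bSuffix]
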